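-- pv_equiv track=rewrite | github.com/Zoe-Lurie/AdventOfCode2024 | day19.py | part1
-- ===== SOURCE A (Python) =====
-- def part1(towels, patterns):
--     maxLen = max(map(len, towels))
--
--     def testPattern(pattern, seen):
--         if not pattern:
--             return True
--
--         if pattern in seen:
--             return False
--
--         for i in range(1, maxLen + 1):
--             if pattern[:i] in towels and testPattern(pattern[i:], seen):
--                 return True
--
--         seen.add(pattern)
--         return False
--
--     return sum([testPattern(pattern, set()) for pattern in patterns])
-- ===== SOURCE B (Python) =====
-- def part1(towels, patterns):
--     maxLen = max(map(len, towels))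
--     ts = set(towels)
--     total = 0
--     for pattern in patterns:
--         n = len(pattern)
--         dp = [True]  # dp[k] here means: suffix pattern[i+1+k:] is buildable
--         for i in range(n - 1, -1, -1):
--             dp.insert(0, any(dp[j - 1] and pattern[i:i + j] in ts
--                              for j in range(1, min(maxLen, n - i) + 1)))
--         total += dp[0]
--     return total
-- ===== Notes on version B (the rewrite author's own statement) =====
-- stated objective: alternative
-- what changed: Replaces A's top-down recursion with a mutated failed-suffix memo set by a per-pattern bottom-up boolean DP table over suffix positions (set(towels) for membership), summed over patterns.
-- outside the precondition, e.g. on part1(set(), ['a']): A raises ValueError, B raises ValueError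
import Mathlib
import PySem

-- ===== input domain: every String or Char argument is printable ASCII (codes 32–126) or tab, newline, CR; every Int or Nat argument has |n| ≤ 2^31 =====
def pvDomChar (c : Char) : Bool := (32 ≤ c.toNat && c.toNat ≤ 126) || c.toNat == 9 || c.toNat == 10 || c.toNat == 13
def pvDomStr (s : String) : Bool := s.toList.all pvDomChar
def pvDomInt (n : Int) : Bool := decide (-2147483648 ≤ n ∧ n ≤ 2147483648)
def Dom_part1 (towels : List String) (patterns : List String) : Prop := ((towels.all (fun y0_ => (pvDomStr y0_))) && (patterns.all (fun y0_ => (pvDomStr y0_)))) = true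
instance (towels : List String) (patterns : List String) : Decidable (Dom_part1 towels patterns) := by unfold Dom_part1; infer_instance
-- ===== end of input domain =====

-- B rewrites A's top-down recursion with a failed-suffix memo set as a bottom-up
-- boolean DP table per pattern (alternative decomposition, same exact results).

-- ===== PORT A =====
-- testPattern / its for-loop, threading the mutated `seen` set through every call.
-- range(1, maxLen+1) is ported as k+1 for k in List.range maxLen (maxLen ≥ 0);
-- pattern[:i] = take (k+1), pattern[i:] = (c::cs).drop (k+1) = cs.drop k (exact, i ≥ 1).
mutual
def tpA (ts : List (List Char)) (m : Nat) : List Char → PySem.Set (List Char) → Bool × PySem.Set (List Char)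
  | [], seen => (true, seen)
  | c :: cs, seen =>
      if PySem.Set.contains seen (c :: cs) then (false, seen)
      else tpLoopA ts m c cs (List.range m) seen
termination_by p _ => (p.length, 1, 0)

def tpLoopA (ts : List (List Char)) (m : Nat) (c : Char) (cs : List Char) : List Nat → PySem.Set (List Char) → Bool × PySem.Set (List Char)
  | [], seen => (false, PySem.Set.add seen (c :: cs))
  | k :: ks, seen =>
      if ts.contains ((c :: cs).take (k+1)) then
        match tpA ts m (cs.drop k) seen with
        | (true, s') => (true, s')
        | (false, s') => tpLoopA ts m c cs ks s'
      else tpLoopA ts m c cs ks seen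
termination_by ks _ => (cs.length + 1, 0, ks.length)
decreasing_by
  · exact Prod.Lex.left _ _ (by simp only [List.length_drop]; omega)
  · exact Prod.Lex.right _ (Prod.Lex.right _ (by simp only [List.length_cons]; omega))
  · exact Prod.Lex.right _ (Prod.Lex.right _ (by simp only [List.length_cons]; omega))
end

def part1 (towels : List String) (patterns : List String) : Int :=
  -- max(map(len, towels)): raises ValueError on towels = [] (excluded by Pre_); getD 0 is unreachable there
  let maxLen : Int := (PySem.List.max? (towels.map fun t => (t.length : Int)) (fun x => x)).getD 0
  let m : Nat := maxLen.toNat   -- maxLen ≥ 0 (a max of lengths): exact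
  let ts : List (List Char) := towels.map String.toList
  (patterns.map fun p => (tpA ts m p.toList PySem.Set.empty).1).foldl
    (fun acc b => acc + (if b then (1 : Int) else 0)) 0

-- ===== PORT B =====
-- Source B: per pattern an iterative DP table built from the right; dp is the list of
-- booleans for positions i+1..n; range(n-1,-1,-1) is (List.range n).reverse,
-- j in 1..min(maxLen, n-i) is k+1 for k in List.range (min m (n-i)),
-- dp[j-1] = dp.getD k false (always in range), pattern[i:i+j] = (p.drop i).take (k+1).
def dpLoopB (tset : PySem.Set (List Char)) (m : Nat) (p : List Char) : List Nat → List Bool → List Bool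
  | [], dp => dp
  | i :: is, dp =>
      dpLoopB tset m p is
        (((List.range (min m (p.length - i))).any fun k =>
            dp.getD k false && PySem.Set.contains tset ((p.drop i).take (k+1))) :: dp)

def part1_alt (towels : List String) (patterns : List String) : Int :=
  let maxLen : Int := (PySem.List.max? (towels.map fun t => (t.length : Int)) (fun x => x)).getD 0
  let m : Nat := maxLen.toNat
  let tset : PySem.Set (List Char) := PySem.Set.ofList (towels.map String.toList)
  patterns.foldl (fun total p =>
      let dp := dpLoopB tset m p.toList ((List.range p.toList.length).reverse) [true]
      total + (if dp.getD 0 false then (1 : Int) else 0)) 0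

-- ===== PRECONDITION & SPEC =====
-- Pre_ excludes only towels = [], where Python's max(map(len, towels)) raises ValueError.
def Pre_part1 (towels : List String) (patterns : List String) : Prop := towels ≠ []
instance (towels : List String) (patterns : List String) : Decidable (Pre_part1 towels patterns) := by unfold Pre_part1; infer_instance
def pvWitness_part1 : List String × List String := (["r", "wr", "b"], ["brwrr", "bggr", ""])

def Spec_part1 (towels : List String) (patterns : List String) (out : Int) : Prop := out = part1_alt towels patterns
instance (towels : List String) (patterns : List String) (out : Int) : Decidable (Spec_part1 towels patterns out) := by unfold Spec_part1; infer_instance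

-- ===== CLAIM (what is proved, stated in full; the proofs are below) =====
def Claim_equal_part1 : Prop := ∀ (towels : List String) (patterns : List String), Dom_part1 towels patterns → Pre_part1 towels patterns → Spec_part1 towels patterns (part1 towels patterns)

-- ===== LEMMAS AND PROOFS =====

-- the common specification: `canSeg ts m p` = p is a concatenation of towels (pieces tried up to length m)
def canSeg (ts : List (List Char)) (m : Nat) : List Char → Bool
  | [] => true
  | c :: cs => (List.range m).any fun k => ts.contains ((c :: cs).take (k+1)) && canSeg ts m (cs.drop k)
termination_by p => p.length
decreasing_by simp only [List.length_drop, List.length_cons]; omega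

theorem canSeg_nil (ts : List (List Char)) (m : Nat) : canSeg ts m [] = true := by
  rw [canSeg]

theorem canSeg_cons (ts : List (List Char)) (m : Nat) (c : Char) (cs : List Char) :
    canSeg ts m (c :: cs) =
      (List.range m).any fun k => ts.contains ((c :: cs).take (k+1)) && canSeg ts m (cs.drop k) := by
  rw [canSeg]

-- A's inner for-loop is correct, assuming correctness of recursive calls on shorter patterns
theorem tpLoopA_main (ts : List (List Char)) (m : Nat) (c : Char) (cs : List Char)
    (IH : ∀ p seen, p.length ≤ cs.length → (∀ s ∈ seen, canSeg ts m s = false) →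
      (tpA ts m p seen).1 = canSeg ts m p ∧ ∀ s ∈ (tpA ts m p seen).2, canSeg ts m s = false) :
    ∀ ks seen, (∀ s ∈ seen, canSeg ts m s = false) →
      canSeg ts m (c :: cs) = (ks.any fun k => ts.contains ((c :: cs).take (k+1)) && canSeg ts m (cs.drop k)) →
      (tpLoopA ts m c cs ks seen).1 = canSeg ts m (c :: cs) ∧
      ∀ s ∈ (tpLoopA ts m c cs ks seen).2, canSeg ts m s = false := by
  intro ks
  induction ks with
  | nil =>
      intro seen hInv hEq
      simp only [tpLoopA]
      refine ⟨by simpa using hEq.symm, ?_⟩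
      intro s hs
      rcases (PySem.Set.mem_add seen (c :: cs) s).1 hs with h | h
      · exact hInv s h
      · subst h; simpa using hEq
  | cons k ks ih =>
      intro seen hInv hEq
      have hdrop : (cs.drop k).length ≤ cs.length := by
        simp only [List.length_drop]; omega
      rw [tpLoopA]
      by_cases hc : ts.contains ((c :: cs).take (k+1)) = true
      · simp only [hc, if_true]
        obtain ⟨h1, h2⟩ := IH (cs.drop k) seen hdrop hInv
        rcases htp : tpA ts m (cs.drop k) seen with ⟨b, s'⟩
        have hb : b = canSeg ts m (cs.drop k) := by rw [htp] at h1; exact h1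
        have hs' : ∀ s ∈ s', canSeg ts m s = false := by
          intro s hs; have := h2 s; rw [htp] at this; exact this hs
        cases b with
        | true =>
            simp only
            constructor
            · rw [List.any_cons] at hEq
              rw [hEq, hc, ← hb]
              simp
            · exact hs'
        | false =>
            simp only
            apply ih s' hs'
            rw [List.any_cons, hc, ← hb] at hEq
            simpa using hEq
      · simp only [hc]
        apply ih seen hInv
        rw [List.any_cons] at hEq
        rw [Bool.not_eq_true] at hc
        rw [hEq, hc, Bool.false_and, Bool.false_or]

-- A's memoized recursion computes canSeg and preserves the failed-suffix invariant
theorem tpA_main (ts : List (List Char)) (m : Nat) :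
    ∀ p seen, (∀ s ∈ seen, canSeg ts m s = false) →
      (tpA ts m p seen).1 = canSeg ts m p ∧ ∀ s ∈ (tpA ts m p seen).2, canSeg ts m s = false := by
  have H : ∀ n p seen, p.length ≤ n → (∀ s ∈ seen, canSeg ts m s = false) →
      (tpA ts m p seen).1 = canSeg ts m p ∧ ∀ s ∈ (tpA ts m p seen).2, canSeg ts m s = false := by
    intro n
    induction n with
    | zero =>
        intro p seen hlen hInv
        have : p = [] := by
          cases p with
          | nil => rfl
          | cons c cs => simp at hlen
        subst this
        refine ⟨by simp [tpA, canSeg], ?_⟩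
        simpa [tpA] using hInv
    | succ n ihn =>
        intro p seen hlen hInv
        cases p with
        | nil =>
            refine ⟨by simp [tpA, canSeg], ?_⟩
            simpa [tpA] using hInv
        | cons c cs =>
            rw [tpA]
            by_cases hmem : PySem.Set.contains seen (c :: cs) = true
            · simp only [hmem, if_true]
              have : (c :: cs) ∈ seen := by
                simpa [PySem.Set.contains] using hmem
              exact ⟨(hInv _ this).symm, hInv⟩
            · simp only [hmem]
              have hcs : cs.length ≤ n := by
                simp only [List.length_cons] at hlen; omega
              exact tpLoopA_main ts m c cs
                (fun p' seen' h h2 => ihn p' seen' (le_trans h hcs) h2)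
                (List.range m) seen hInv (canSeg_cons ts m c cs)
  exact fun p seen => H p.length p seen le_rfl

-- `in set(towels)` agrees with `in towels`
theorem contains_ofList (ts : List (List Char)) (x : List Char) :
    PySem.Set.contains (PySem.Set.ofList ts) x = ts.contains x := by
  simp [PySem.Set.contains, PySem.Set.mem_ofList]

-- restricting the tried-piece range to the suffix length does not change the answer
theorem any_range_min (ts : List (List Char)) (m : Nat) (c : Char) (cs : List Char) :
    ((List.range (min m (cs.length + 1))).any fun k =>
        ts.contains ((c :: cs).take (k+1)) && canSeg ts m (cs.drop k)) =
    ((List.range m).any fun k =>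
        ts.contains ((c :: cs).take (k+1)) && canSeg ts m (cs.drop k)) := by
  rcases le_or_gt m (cs.length + 1) with h | h
  · rw [min_eq_left h]
  · rw [min_eq_right (by omega)]
    have hgh : ∀ k, cs.length ≤ k →
        (ts.contains ((c :: cs).take (k+1)) && canSeg ts m (cs.drop k)) =
        (ts.contains ((c :: cs).take (cs.length+1)) && canSeg ts m (cs.drop cs.length)) := by
      intro k hk
      rw [List.take_of_length_le (by simp; omega), List.take_of_length_le (by simp),
        List.drop_of_length_le hk, List.drop_of_length_le le_rfl]
    apply Bool.eq_iff_iff.2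
    simp only [List.any_eq_true, List.mem_range]
    constructor
    · rintro ⟨k, hk, hgk⟩
      exact ⟨k, by omega, hgk⟩
    · rintro ⟨k, hk, hgk⟩
      rcases lt_or_ge k (cs.length + 1) with h2 | h2
      · exact ⟨k, h2, hgk⟩
      · refine ⟨cs.length, by omega, ?_⟩
        rw [hgh cs.length le_rfl]
        rw [hgh k (by omega)] at hgk
        exact hgk

-- B's tabulation loop: dp holds canSeg of every suffix from position k on, and ends with all of them
theorem dpLoopB_main (ts : List (List Char)) (m : Nat) (p : List Char) :
    ∀ k dp, k ≤ p.length →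
      dp = (List.range' k (p.length + 1 - k)).map (fun i => canSeg ts m (p.drop i)) →
      dpLoopB (PySem.Set.ofList ts) m p ((List.range k).reverse) dp =
        (List.range' 0 (p.length + 1)).map (fun i => canSeg ts m (p.drop i)) := by
  intro k
  induction k with
  | zero =>
      intro dp _ hdp
      simpa [dpLoopB] using hdp
  | succ k ih =>
      intro dp hk hdp
      have hk' : k < p.length := by omega
      have hrev : (List.range (k+1)).reverse = k :: (List.range k).reverse := by
        rw [List.range_succ, List.reverse_append]; rfl
      rw [hrev, dpLoopB]
      have hdplen : dp.length = p.length - k := by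
        rw [hdp, List.length_map, List.length_range']; omega
      have hgetD : ∀ j, j < p.length - k →
          dp.getD j false = canSeg ts m (p.drop (k + 1 + j)) := by
        intro j hj
        have hjlen : j < dp.length := by omega
        rw [List.getD_eq_getElem dp false hjlen]
        have hjlen' : j < ((List.range' (k+1) (p.length + 1 - (k+1))).map
            (fun i => canSeg ts m (p.drop i))).length := by
          rw [← hdp]; exact hjlen
        have : dp[j] = ((List.range' (k+1) (p.length + 1 - (k+1))).map
            (fun i => canSeg ts m (p.drop i)))[j]'hjlen' := by
          congr 1
        rw [this]
        simp only [List.getElem_map, List.getElem_range']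
        congr 2
        omega
      have hs : p.drop k = p[k] :: p.drop (k + 1) := List.drop_eq_getElem_cons hk'
      have hv : ((List.range (min m (p.length - k))).any fun j =>
            dp.getD j false && PySem.Set.contains (PySem.Set.ofList ts) ((p.drop k).take (j+1))) =
          canSeg ts m (p.drop k) := by
        rw [hs, canSeg_cons, ← any_range_min ts m p[k] (p.drop (k+1))]
        have hmin : min m ((p.drop (k+1)).length + 1) = min m (p.length - k) := by
          rw [List.length_drop]; congr 1; omega
        rw [hmin]
        apply Bool.eq_iff_iff.2
        simp only [List.any_eq_true, List.mem_range]
        have hterm : ∀ j, j < min m (p.length - k) →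
            (dp.getD j false && PySem.Set.contains (PySem.Set.ofList ts) ((p[k] :: p.drop (k+1)).take (j+1))) =
            (ts.contains ((p[k] :: p.drop (k+1)).take (j+1)) && canSeg ts m ((p.drop (k+1)).drop j)) := by
          intro j hj
          rw [contains_ofList, List.drop_drop, hgetD j (by omega), Bool.and_comm]
        constructor
        · rintro ⟨j, hj, hgj⟩
          exact ⟨j, hj, by rw [← hterm j hj]; exact hgj⟩
        · rintro ⟨j, hj, hgj⟩
          exact ⟨j, hj, by rw [hterm j hj]; exact hgj⟩
      rw [hv]
      refine ih _ (by omega) ?_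
      rw [show p.length + 1 - k = (p.length + 1 - (k+1)) + 1 by omega, List.range'_succ,
        List.map_cons, ← hdp]

-- both folds add 1 exactly for the patterns satisfying canSeg
theorem fold_eq (ts : List (List Char)) (m : Nat) :
    ∀ (patterns : List String) (acc : Int),
      (patterns.map fun p => (tpA ts m p.toList PySem.Set.empty).1).foldl
          (fun acc b => acc + (if b then (1 : Int) else 0)) acc =
      patterns.foldl (fun total p =>
          let dp := dpLoopB (PySem.Set.ofList ts) m p.toList ((List.range p.toList.length).reverse) [true]
          total + (if dp.getD 0 false then (1 : Int) else 0)) acc := by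
  intro patterns
  induction patterns with
  | nil => intro acc; rfl
  | cons p ps ih =>
      intro acc
      rw [List.map_cons, List.foldl_cons, List.foldl_cons, ih]
      have h1 : (tpA ts m p.toList PySem.Set.empty).1 = canSeg ts m p.toList :=
        (tpA_main ts m p.toList PySem.Set.empty (by simp [PySem.Set.empty])).1
      have h2 : (dpLoopB (PySem.Set.ofList ts) m p.toList ((List.range p.toList.length).reverse)
          [true]).getD 0 false = canSeg ts m p.toList := by
        rw [dpLoopB_main ts m p.toList p.toList.length [true] le_rfl (by
          rw [show p.toList.length + 1 - p.toList.length = 1 from by omega, List.range'_one]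
          simp only [List.map_cons, List.map_nil, List.drop_length, canSeg_nil])]
        rw [List.getD_eq_getElem _ false (by simp)]
        simp [List.getElem_range']
      simp only [h1, h2]

-- ===== VERDICT (by name: the statement is the Claim_ definition above) =====
theorem part1_spec : Claim_equal_part1 := by
  intro towels patterns _ _
  unfold Spec_part1 part1 part1_alt
  simp only
  rw [fold_eq]
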